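-- pv_equiv track=rewrite | github.com/gmohlue/ConstitutionBOT | src/contentmanager/core/document/loader.py | _parse_chapter_num
-- ===== SOURCE A (Python) =====
-- def _parse_chapter_num(num_str: str) -> int:
--     """Parse chapter number from string (handles Roman numerals)."""
--     num_str = num_str.strip()
--     if num_str.isdigit():
--         return int(num_str)
--     # Try Roman numerals
--     roman_map = {
--         'I': 1, 'V': 5, 'X': 10, 'L': 50, 'C': 100
--     }
--     try:
--         result = 0
--         prev = 0
--         for char in reversed(num_str.upper()):
--             val = roman_map.get(char, 0)
--             if val < prev:
--                 result -= val
--             else: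
--                 result += val
--             prev = val
--         return result if result > 0 else 1
--     except (KeyError, ValueError):
--         return 1
-- ===== SOURCE B (Python) =====
-- def _parse_chapter_num(num_str: str) -> int:
--     """Parse chapter number from string (handles Roman numerals)."""
--     num_str = num_str.strip()
--     if num_str.isdigit():
--         return int(num_str)
--     roman_map = {'I': 1, 'V': 5, 'X': 10, 'L': 50, 'C': 100}
--     vals = [roman_map.get(c, 0) for c in num_str.upper()]
--     total = sum(vals) - 2 * sum(a for a, b in zip(vals, vals[1:]) if a < b)
--     return total if total > 0 else 1
-- ===== Notes on version B (the rewrite author's own statement) =====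
-- stated objective: alternative
-- what changed: Replaces the reverse-scan accumulator carrying (result, prev) state with a stateless two-pass computation: map characters to a value list, sum it, then subtract 2*v for each position whose value is smaller than its right neighbour.
import Mathlib
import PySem

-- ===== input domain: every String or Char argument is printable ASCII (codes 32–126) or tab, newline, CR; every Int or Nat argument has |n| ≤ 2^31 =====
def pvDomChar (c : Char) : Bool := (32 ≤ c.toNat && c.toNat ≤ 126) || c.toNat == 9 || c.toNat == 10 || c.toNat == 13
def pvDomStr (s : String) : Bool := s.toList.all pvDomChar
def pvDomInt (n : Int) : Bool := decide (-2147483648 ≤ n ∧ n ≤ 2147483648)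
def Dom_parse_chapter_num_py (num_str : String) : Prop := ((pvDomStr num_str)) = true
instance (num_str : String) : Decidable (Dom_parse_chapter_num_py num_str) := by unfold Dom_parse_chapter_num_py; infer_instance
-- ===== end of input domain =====

-- B replaces A's reverse-scan (result, prev) accumulator with a stateless two-pass
-- computation (sum of values minus twice each value smaller than its right neighbour);
-- alternative decomposition, same O(n) cost.


-- ===== PORT A =====
-- roman_map = {'I': 1, 'V': 5, 'X': 10, 'L': 50, 'C': 100}
def romanMap : PySem.Dict Char Int :=
  PySem.Dict.ofList [('I', 1), ('V', 5), ('X', 10), ('L', 50), ('C', 100)]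

-- `int(num_str)` is reached only when isdigit() is true, where ofStr? always succeeds,
-- so `.getD 0` is exact there; the roman loop never raises, so try/except is a no-op.
def parse_chapter_num_py (num_str : String) : Int :=
  let s := PySem.Str.strip num_str
  if PySem.Str.strIsdigit s then (PySem.Int.ofStr? s).getD 0
  else
    let p := ((PySem.Str.upper s).toList.reverse).foldl
      (fun (st : Int × Int) c =>
        let val := PySem.Dict.getD romanMap c 0
        (if val < st.2 then st.1 - val else st.1 + val, val)) (0, 0)
    if p.1 > 0 then p.1 else 1

-- ===== PORT B =====
def parse_chapter_num_py_alt (num_str : String) : Int :=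
  let s := PySem.Str.strip num_str
  if PySem.Str.strIsdigit s then (PySem.Int.ofStr? s).getD 0
  else
    let vals := (PySem.Str.upper s).toList.map (fun c => PySem.Dict.getD romanMap c 0)
    let total := vals.sum -
      2 * (vals.zip vals.tail).foldl (fun acc p => if p.1 < p.2 then acc + p.1 else acc) 0
    if total > 0 then total else 1

-- ===== PRECONDITION & SPEC =====
def Spec_parse_chapter_num_py (num_str : String) (out : Int) : Prop := out = parse_chapter_num_py_alt num_str
instance (num_str : String) (out : Int) : Decidable (Spec_parse_chapter_num_py num_str out) := by unfold Spec_parse_chapter_num_py; infer_instance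

-- ===== CLAIM (what is proved, stated in full; the proofs are below) =====
def Claim_equal_parse_chapter_num_py : Prop := ∀ (num_str : String), Dom_parse_chapter_num_py num_str → Spec_parse_chapter_num_py num_str (parse_chapter_num_py num_str)

-- ===== LEMMAS AND PROOFS =====

theorem rm_eq : romanMap = PySem.Dict.mk [('I', 1), ('V', 5), ('X', 10), ('L', 50), ('C', 100)] := by
  decide

theorem roman_val_nonneg (c : Char) : 0 ≤ PySem.Dict.getD romanMap c 0 := by
  rw [PySem.Dict.getD_eq_get?_getD, rm_eq]
  simp only [PySem.Dict.get?_mk_cons]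
  split_ifs <;> simp [PySem.Dict.get?]

theorem foldl_if_add_shift (a : Int) (l : List (Int × Int)) :
    l.foldl (fun acc p => if p.1 < p.2 then acc + p.1 else acc) a
      = a + l.foldl (fun acc p => if p.1 < p.2 then acc + p.1 else acc) 0 := by
  induction l generalizing a with
  | nil => simp
  | cons p l ih =>
      simp only [List.foldl_cons]
      rw [ih, ih (if p.1 < p.2 then (0:Int) + p.1 else 0)]
      split_ifs <;> ring

theorem roman_fold_eq (vs : List Int) (h : ∀ v ∈ vs, 0 ≤ v) :
    vs.reverse.foldl (fun (st : Int × Int) v =>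
        (if v < st.2 then st.1 - v else st.1 + v, v)) (0, 0)
      = (vs.sum - 2 * (vs.zip vs.tail).foldl (fun acc p => if p.1 < p.2 then acc + p.1 else acc) 0,
         vs.headD 0) := by
  induction vs with
  | nil => simp
  | cons v vs ih =>
      have hv : 0 ≤ v := h v (by simp)
      have h' : ∀ x ∈ vs, 0 ≤ x := fun x hx => h x (by simp [hx])
      rw [List.reverse_cons, List.foldl_append, ih h']
      cases vs with
      | nil =>
          simp only [List.foldl_cons, List.foldl_nil, List.sum_cons, List.sum_nil,
            List.headD_cons, List.tail_cons, List.zip_nil_right]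
          have : ¬ ((v:Int) < 0) := not_lt.mpr hv
          simp [this]
      | cons w ws =>
          simp only [List.foldl_cons, List.foldl_nil, List.sum_cons,
            List.headD_cons, List.tail_cons, List.zip_cons_cons]
          refine Prod.ext ?_ rfl
          split_ifs with hvw
          · rw [foldl_if_add_shift (0 + v)]
            generalize ((w :: ws).zip ws).foldl
              (fun acc p => if p.1 < p.2 then acc + p.1 else acc) 0 = t
            omega
          · generalize ((w :: ws).zip ws).foldl
              (fun acc p => if p.1 < p.2 then acc + p.1 else acc) 0 = t
            omega

-- ===== VERDICT (by name: the statement is the Claim_ definition above) =====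
theorem parse_chapter_num_py_spec : Claim_equal_parse_chapter_num_py := by
  intro num_str _
  unfold Spec_parse_chapter_num_py parse_chapter_num_py parse_chapter_num_py_alt
  by_cases hd : PySem.Str.strIsdigit (PySem.Str.strip num_str)
  · simp only [hd, if_true]
  · simp only [hd, Bool.false_eq_true, if_false]
    have hmap : ((PySem.Str.upper (PySem.Str.strip num_str)).toList.reverse).foldl
        (fun (st : Int × Int) c =>
          let val := PySem.Dict.getD romanMap c 0
          (if val < st.2 then st.1 - val else st.1 + val, val)) (0, 0)
      = (((PySem.Str.upper (PySem.Str.strip num_str)).toList.map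
            (fun c => PySem.Dict.getD romanMap c 0)).reverse).foldl
          (fun (st : Int × Int) v =>
            (if v < st.2 then st.1 - v else st.1 + v, v)) (0, 0) := by
      rw [← List.map_reverse, List.foldl_map]
    rw [hmap, roman_fold_eq _ (by
      intro v hv
      rcases List.mem_map.mp hv with ⟨c, _, rfl⟩
      exact roman_val_nonneg c)]
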